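-- pv_equiv track=rewrite | github.com/ktjgupta/Stock_Price_Prediction | jump3.py | recursearr
-- ===== SOURCE A (Python) =====
-- def recursearr(A, i):
--     if i == len(A):
--         return 0
--
--     minval = 1000000000
--     minindex = 0
--     ogi = i
--     while i < len(A):
--         if A[i] < minval:
--             minval = A[i]
--             minindex = i
--         i += 1
--     if (ogi == minindex):
--         return recursearr(A, minindex + 1)
--     return (1 + recursearr(A, minindex + 1))
-- ===== SOURCE B (Python) =====
-- def recursearr(A, i):
--     n = len(A)
--     # first-argmin of every suffix, tabulated in one right-to-left pass
--     sufmin = {}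
--     best = None
--     for j in range(n - 1, -1, -1):
--         if best is None or A[j] <= A[best]:
--             best = j
--         sufmin[j] = best
--     count = 0
--     while i != n:
--         m = sufmin.get(i, 0)
--         if m != i:
--             count += 1
--         i = m + 1
--     return count
-- ===== Notes on version B (the rewrite author's own statement) =====
-- stated objective: faster
-- what changed: A re-scans the whole suffix for its minimum at every recursive restart (O(n^2)); B tabulates the first-argmin of every suffix in one right-to-left pass into a dict and then jump-iterates over it with a counter (O(n)); Pre_ excludes negative start indices (A's negative-index wraparound scan is accidental and raises IndexError for i < -len) and inputs on which A recurses forever because of its 10^9 sentinel or an empty-list restart.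
-- outside the precondition, e.g. on recursearr([5], -1): A returns 0, B returns 1
import Mathlib
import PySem

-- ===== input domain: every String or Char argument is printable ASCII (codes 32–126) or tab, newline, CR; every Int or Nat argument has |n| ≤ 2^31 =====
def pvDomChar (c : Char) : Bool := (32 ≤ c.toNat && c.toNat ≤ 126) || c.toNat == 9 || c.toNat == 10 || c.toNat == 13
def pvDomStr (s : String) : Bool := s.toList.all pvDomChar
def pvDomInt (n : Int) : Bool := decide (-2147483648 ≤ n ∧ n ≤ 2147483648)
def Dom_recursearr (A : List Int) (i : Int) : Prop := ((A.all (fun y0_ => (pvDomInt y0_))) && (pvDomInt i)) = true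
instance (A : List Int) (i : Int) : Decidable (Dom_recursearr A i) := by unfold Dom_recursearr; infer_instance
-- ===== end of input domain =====

-- B replaces A's quadratic restart-scan recursion by a single right-to-left pass that
-- tabulates the first-argmin of every suffix in a dict and then jump-iterates (objective: faster).

-- ===== PORT A =====
-- the `while i < len(A)` scan; structural on a fuel = the loop's trip count + 1, so the
-- kernel can evaluate it; `none` from pyGet? = Python IndexError (i < -len), outside Pre_
def recAloop (A : List Int) : Nat → Int → Int → Int → Int × Int
  | 0, _, minval, minindex => (minval, minindex)
  | fuel + 1, i, minval, minindex =>
    if i < (A.length : Int) then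
      match PySem.List.pyGet? A i with
      | none => (minval, minindex)
      | some x =>
        if x < minval then recAloop A fuel (i + 1) x i
        else recAloop A fuel (i + 1) minval minindex
    else (minval, minindex)

-- A's self-recursion, made total with fuel (inside Pre_ the depth is ≤ len + 1)
def recAfuel (A : List Int) : Nat → Int → Int
  | 0, _ => 0
  | fuel + 1, i =>
    if i = (A.length : Int) then 0
    else
      let p := recAloop A (((A.length : Int) - i).toNat + 1) i 1000000000 0
      if i = p.2 then recAfuel A fuel (p.2 + 1)
      else 1 + recAfuel A fuel (p.2 + 1)

def recursearr (A : List Int) (i : Int) : Int := recAfuel A (A.length + 1) i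

-- ===== PORT B =====
-- the `for j in range(n-1,-1,-1)` build of the dict `sufmin`; `best` is python's best
def bBuildD (A : List Int) : Nat → Option Nat → PySem.Dict Int Nat → PySem.Dict Int Nat
  | 0, _, d => d
  | j + 1, best, d =>
    let b' : Nat := match best with
      | none => j
      | some b => if A.getD j 0 ≤ A.getD b 0 then j else b
    bBuildD A j (some b') (d.insert (j : Int) b')

-- the `while i != n` jump loop, fuel for totality (inside Pre_ it runs ≤ n + 2 times)
def bJump (sufmin : PySem.Dict Int Nat) (n : Nat) : Nat → Int → Int → Int
  | 0, _, count => count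
  | fuel + 1, i, count =>
    if i ≠ (n : Int) then
      let m := sufmin.getD i 0
      if (m : Int) ≠ i then bJump sufmin n fuel ((m : Int) + 1) (count + 1)
      else bJump sufmin n fuel ((m : Int) + 1) count
    else count

def recursearr_alt (A : List Int) (i : Int) : Int :=
  bJump (bBuildD A A.length none PySem.Dict.empty) A.length (A.length + 2) i 0

-- ===== PRECONDITION & SPEC =====
-- Pre_ excludes negative start indices (there A's negative-index wraparound scan is accidental
-- and raises IndexError for i < -len) and inputs on which A's sentinel minimum 10^9 or its
-- restart from an empty list makes it recurse forever (it returns no value there).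
def Pre_recursearr (A : List Int) (i : Int) : Prop :=
  0 ≤ i ∧
    (i ≤ (A.length : Int) →
      (i = (A.length : Int) ∨ A.getD (A.length - 1) 0 < 1000000000 ∨
        (A.length = 1 ∧ i = 0))) ∧
    ((A.length : Int) < i →
      A ≠ [] ∧ (A.length = 1 ∨ A.getD (A.length - 1) 0 < 1000000000))
instance (A : List Int) (i : Int) : Decidable (Pre_recursearr A i) := by
  unfold Pre_recursearr; infer_instance

def pvWitness_recursearr : List Int × Int := ([3, 1, 2], 0)

def Spec_recursearr (A : List Int) (i : Int) (out : Int) : Prop := out = recursearr_alt A i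
instance (A : List Int) (i : Int) (out : Int) : Decidable (Spec_recursearr A i out) := by
  unfold Spec_recursearr; infer_instance

-- ===== CLAIM (what is proved, stated in full; the proofs are below) =====
def Claim_equal_recursearr : Prop :=
  ∀ (A : List Int) (i : Int), Dom_recursearr A i → Pre_recursearr A i →
    Spec_recursearr A i (recursearr A i)

-- ===== LEMMAS AND PROOFS =====

-- proof-side spec: minimum of a list together with the offset of its FIRST occurrence
def fm : List Int → Option (Int × Nat)
  | [] => none
  | x :: xs =>
    match fm xs with
    | none => some (x, 0)
    | some (m, k) => if x ≤ m then some (x, 0) else some (m, k + 1)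

theorem fm_eq_none {l : List Int} : fm l = none ↔ l = [] := by
  cases l with
  | nil => simp [fm]
  | cons x xs =>
    simp only [fm]
    cases h : fm xs with
    | none => simp
    | some p => obtain ⟨m, k⟩ := p; by_cases hx : x ≤ m <;> simp [hx]

theorem fm_k_lt {l : List Int} {m : Int} {k : Nat} (h : fm l = some (m, k)) : k < l.length := by
  induction l generalizing m k with
  | nil => simp [fm] at h
  | cons x xs ih =>
    simp only [fm] at h
    cases hx : fm xs with
    | none => rw [hx] at h; simp at h; simp [h.2.symm]
    | some p =>
      obtain ⟨m', k'⟩ := p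
      rw [hx] at h
      by_cases hle : x ≤ m' <;> simp [hle] at h
      · simp [h.2.symm]
      · obtain ⟨rfl, rfl⟩ := And.intro h.1 h.2
        simpa using Nat.succ_lt_succ (ih hx)

theorem fm_getD {l : List Int} {m : Int} {k : Nat} (h : fm l = some (m, k)) : l.getD k 0 = m := by
  induction l generalizing m k with
  | nil => simp [fm] at h
  | cons x xs ih =>
    simp only [fm] at h
    cases hx : fm xs with
    | none => rw [hx] at h; simp at h; simp [← h.2, h.1]
    | some p =>
      obtain ⟨m', k'⟩ := p
      rw [hx] at h
      by_cases hle : x ≤ m' <;> simp [hle] at h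
      · simp [← h.2, h.1]
      · obtain ⟨rfl, rfl⟩ := And.intro h.1 h.2
        simpa using ih hx

-- characterization of A's while-loop
theorem recAloop_spec (A : List Int) (l : List Int) :
    ∀ (fuel : Nat) (i mv mi : Int), 0 ≤ i → A.drop i.toNat = l → l.length < fuel →
    recAloop A fuel i mv mi =
      (match fm l with
       | none => (mv, mi)
       | some (m, k) => if m < mv then (m, i + k) else (mv, mi)) := by
  induction l with
  | nil =>
    intro fuel i mv mi h0 hd hf
    have hlen : A.length ≤ i.toNat := by
      have := congrArg List.length hd
      simp [List.length_drop] at this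
      omega
    have hni : ¬ i < (A.length : Int) := by omega
    rcases fuel with _ | fuel
    · omega
    rw [recAloop]
    simp [hni, fm]
  | cons x xs ih =>
    intro fuel i mv mi h0 hd hf
    rcases fuel with _ | fuel
    · simp at hf
    have hlt : i.toNat < A.length := by
      have := congrArg List.length hd
      simp [List.length_drop] at this
      omega
    have hilt : i < (A.length : Int) := by omega
    have hget : PySem.List.pyGet? A i = some x := by
      rw [PySem.List.pyGet?_of_nonneg A h0]
      have h0d : (A.drop i.toNat)[0]? = some x := by rw [hd]; rfl
      rw [List.getElem?_drop] at h0d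
      simpa using h0d
    have hdrop : A.drop (i + 1).toNat = xs := by
      have h1 : (i + 1).toNat = i.toNat + 1 := by omega
      rw [h1, ← List.tail_drop, hd]
      rfl
    have h0' : (0 : Int) ≤ i + 1 := by omega
    have hf' : xs.length < fuel := by simp at hf; omega
    rw [recAloop]
    rw [if_pos hilt, hget]
    simp only [fm]
    cases hfm : fm xs with
    | none =>
      by_cases hx : x < mv
      · rw [if_pos hx, ih fuel (i + 1) x i h0' hdrop hf', hfm]
        simp [hx]
      · rw [if_neg hx, ih fuel (i + 1) mv mi h0' hdrop hf', hfm]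
        simp [hx]
    | some p =>
      obtain ⟨m, k⟩ := p
      by_cases hx : x < mv
      · rw [if_pos hx, ih fuel (i + 1) x i h0' hdrop hf', hfm]
        by_cases hxm : x ≤ m
        · have : ¬ m < x := by omega
          simp [hxm, this, hx]
        · have hmx : m < x := by omega
          simp only [if_neg hxm, hmx, if_pos]
          have : m < mv := by omega
          simp only [this, if_pos]
          congr 1
          push_cast
          ring
      · rw [if_neg hx, ih fuel (i + 1) mv mi h0' hdrop hf', hfm]
        by_cases hxm : x ≤ m
        · have h1 : ¬ x < mv := hx
          have h2 : ¬ m < mv := by omega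
          simp [hxm, h1, h2]
        · simp only [if_neg hxm]
          by_cases h2 : m < mv
          · simp only [h2, if_pos]
            congr 1
            push_cast
            ring
          · simp [h2]

-- index of the first minimum of the suffix A[j:] (0 for an empty suffix)
def sufIdx (A : List Int) (j : Nat) : Nat :=
  match fm (A.drop j) with
  | none => 0
  | some (_, k) => j + k

-- B's dict build: what every lookup of the finished dict returns
theorem bBuildD_getD (A : List Int) :
    ∀ (j : Nat) (best : Option Nat) (d : PySem.Dict Int Nat), j ≤ A.length →
      (best = match fm (A.drop j) with
        | none => none
        | some (_, k) => some (j + k)) →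
      ∀ (x : Int), (bBuildD A j best d).getD x 0 =
        if 0 ≤ x ∧ x < (j : Int) then sufIdx A x.toNat else d.getD x 0 := by
  intro j
  induction j with
  | zero =>
    intro best d _ _ x
    rw [if_neg (by omega : ¬ (0 ≤ x ∧ x < ((0 : Nat) : Int)))]
    rfl
  | succ j ihj =>
    intro best d hj hbest x
    have hjlt : j < A.length := by omega
    have hdropj : A.drop j = A[j] :: A.drop (j + 1) := List.drop_eq_getElem_cons hjlt
    have hbest' : ∀ v : Nat, v = sufIdx A j →
        (some v : Option Nat) =
          (match fm (A.drop j) with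
            | none => none
            | some (_, k) => some (j + k)) := by
      intro v hv
      cases hfmj : fm (A.drop j) with
      | none =>
        exfalso
        have h1 := fm_eq_none.mp hfmj
        have h2 := congrArg List.length h1
        simp [List.length_drop] at h2
        omega
      | some p =>
        obtain ⟨m, k⟩ := p
        rw [hv]
        unfold sufIdx
        rw [hfmj]
    have hfinish : ∀ (v : Nat), v = sufIdx A j →
        (bBuildD A j (some v) (d.insert (j : Int) v)).getD x 0 =
          if 0 ≤ x ∧ x < ((j + 1 : Nat) : Int) then sufIdx A x.toNat else d.getD x 0 := by
      intro v hv
      rw [ihj (some v) (d.insert (j : Int) v) (by omega) (hbest' v hv) x]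
      rw [PySem.Dict.getD_insert]
      by_cases hx1 : 0 ≤ x ∧ x < (j : Int)
      · rw [if_pos hx1, if_pos (by omega : 0 ≤ x ∧ x < ((j + 1 : Nat) : Int))]
      · rw [if_neg hx1]
        by_cases hx2 : x = (j : Int)
        · rw [if_pos hx2, if_pos (by omega : 0 ≤ x ∧ x < ((j + 1 : Nat) : Int))]
          rw [hv]
          congr 1
          omega
        · rw [if_neg hx2, if_neg (by omega : ¬ (0 ≤ x ∧ x < ((j + 1 : Nat) : Int)))]
    cases best with
    | none =>
      -- python's `best is None`: the suffix A[j+1:] is empty, the candidate is j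
      have hfm : fm (A.drop (j + 1)) = none := by
        cases h : fm (A.drop (j + 1)) with
        | none => rfl
        | some p => obtain ⟨m, k⟩ := p; rw [h] at hbest; simp at hbest
      have hsj : (j : Nat) = sufIdx A j := by
        unfold sufIdx
        rw [hdropj, fm_eq_none.mp hfm]
        simp [fm]
      exact hfinish j hsj
    | some b =>
      obtain ⟨m, k, hfm, hb⟩ : ∃ m k, fm (A.drop (j + 1)) = some (m, k) ∧ b = j + 1 + k := by
        cases h : fm (A.drop (j + 1)) with
        | none => rw [h] at hbest; simp at hbest
        | some p =>
          obtain ⟨m, k⟩ := p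
          rw [h] at hbest
          simp at hbest
          exact ⟨m, k, rfl, hbest⟩
      have hgd : A.getD (j + 1 + k) 0 = m := by
        have h1 := fm_getD hfm
        have h2 : (A.drop (j + 1))[k]? = A[j + 1 + k]? := by
          rw [List.getElem?_drop]
        have h3 : (A.drop (j + 1)).getD k 0 = A.getD (j + 1 + k) 0 := by
          simp only [List.getD, h2]
        rw [← h3, h1]
      have hgj : A.getD j 0 = A[j] := List.getD_eq_getElem A 0 hjlt
      have hsj : (if A.getD j 0 ≤ A.getD b 0 then j else b) = sufIdx A j := by
        subst hb
        unfold sufIdx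
        rw [hdropj]
        simp only [fm, hfm]
        rw [hgd, hgj]
        by_cases hle : A[j] ≤ m <;> simp [hle] <;> omega
      exact hfinish _ hsj

theorem fm_le {l : List Int} {m : Int} {k : Nat} (h : fm l = some (m, k)) :
    ∀ x ∈ l, m ≤ x := by
  induction l generalizing m k with
  | nil => simp [fm] at h
  | cons x xs ih =>
    simp only [fm] at h
    intro y hy
    cases hx : fm xs with
    | none =>
      rw [hx] at h
      rw [fm_eq_none.mp hx] at hy
      simp at h hy
      omega
    | some p =>
      obtain ⟨m', k'⟩ := p
      rw [hx] at h
      rcases List.mem_cons.mp hy with hy1 | hy'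
      · by_cases hle : x ≤ m' <;> simp [hle] at h <;> omega
      · have := ih hx y hy'
        by_cases hle : x ≤ m' <;> simp [hle] at h <;> omega

theorem main_ind (A : List Int) (d : PySem.Dict Int Nat)
    (hd : ∀ (x : Int), d.getD x 0 =
      if 0 ≤ x ∧ x < ((A.length : Nat) : Int) then sufIdx A x.toNat else 0) :
    ∀ (t : Nat) (fa fb : Nat) (i : Int) (count : Int), 0 ≤ i → i ≤ (A.length : Int) →
      (i = (A.length : Int) ∨ A.getD (A.length - 1) 0 < 1000000000 ∨
        (A.length = 1 ∧ i = 0)) →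
      ((A.length : Int) - i).toNat = t → t < fa → t < fb →
      count + recAfuel A fa i = bJump d A.length fb i count := by
  intro t
  induction t using Nat.strong_induction_on with
  | _ t ih =>
    intro fa fb i count h0 hn hlast ht hfa hfb
    rcases fa with _ | fa
    · omega
    rcases fb with _ | fb
    · omega
    by_cases hend : i = (A.length : Int)
    · rw [recAfuel, if_pos hend, bJump, if_neg (by omega : ¬ i ≠ (A.length : Int))]
      ring
    · have hilt : i < (A.length : Int) := lt_of_le_of_ne hn hend
      have hlt : i.toNat < A.length := by omega
      obtain ⟨⟨m, k⟩, hfm⟩ : ∃ p : Int × Nat, fm (A.drop i.toNat) = some p := by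
        cases hfm : fm (A.drop i.toNat) with
        | none =>
          exfalso
          have h1 := fm_eq_none.mp hfm
          have h2 := congrArg List.length h1
          simp [List.length_drop] at h2
          omega
        | some p => exact ⟨p, rfl⟩
      have hk : k < A.length - i.toNat := by
        have := fm_k_lt hfm
        simpa [List.length_drop] using this
      have hm : m < 1000000000 ∨ ((A.length : Int) = 1 ∧ i = 0 ∧ k = 0) := by
        rcases hlast with h | h | h
        · exact absurd h hend
        · left
          have hlen0 : A.length - 1 - i.toNat < (A.drop i.toNat).length := by
            simp [List.length_drop]; omega
          have hg : (A.drop i.toNat).getD (A.length - 1 - i.toNat) 0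
              = A.getD (A.length - 1) 0 := by
            simp only [List.getD, List.getElem?_drop]
            congr 2
            omega
          have hmem : A.getD (A.length - 1) 0 ∈ A.drop i.toNat := by
            rw [← hg, List.getD_eq_getElem _ 0 hlen0]
            exact List.getElem_mem _
          have hle := fm_le hfm _ hmem
          omega
        · right
          refine ⟨by omega, h.2, by omega⟩
      have hloop : (recAloop A (((A.length : Int) - i).toNat + 1) i 1000000000 0).2 = i + k := by
        rw [recAloop_spec A _ _ i 1000000000 0 h0 rfl (by simp [List.length_drop]; omega), hfm]
        rcases hm with hm | ⟨h1, h2, h3⟩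
        · simp [hm]
        · by_cases hx : m < 1000000000
          · simp [hx]
          · simp [hx, h2, h3]
      have hnextlast : i + k + 1 = (A.length : Int) ∨
          A.getD (A.length - 1) 0 < 1000000000 ∨ (A.length = 1 ∧ i + k + 1 = 0) := by
        rcases hlast with h | h | h
        · exact absurd h hend
        · exact Or.inr (Or.inl h)
        · left; omega
      have hgets : d.getD i 0 = i.toNat + k := by
        rw [hd i, if_pos ⟨h0, hilt⟩]
        unfold sufIdx
        rw [hfm]
      rw [recAfuel, if_neg hend, bJump, if_pos (by omega : i ≠ (A.length : Int))]
      simp only [hloop, hgets]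
      have hcast : ((i.toNat + k : Nat) : Int) = i + k := by omega
      rw [hcast]
      have hnext0 : (0 : Int) ≤ i + k + 1 := by omega
      have hnextn : i + k + 1 ≤ (A.length : Int) := by omega
      have hmeas : ((A.length : Int) - (i + k + 1)).toNat < t := by omega
      split_ifs with h1 h2 h3
      · exfalso; omega
      · exact ih _ hmeas fa fb (i + k + 1) count hnext0 hnextn hnextlast rfl (by omega) (by omega)
      · have := ih _ hmeas fa fb (i + k + 1) (count + 1) hnext0 hnextn hnextlast rfl (by omega) (by omega)
        omega
      · exfalso; omega

-- ===== VERDICT (by name: the statement is the Claim_ definition above) =====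
theorem recursearr_spec : Claim_equal_recursearr := by
  intro A i _ hpre
  obtain ⟨h0, hle, hgt⟩ := hpre
  unfold Spec_recursearr recursearr recursearr_alt
  have hd : ∀ (x : Int), (bBuildD A A.length none PySem.Dict.empty).getD x 0 =
      if 0 ≤ x ∧ x < ((A.length : Nat) : Int) then sufIdx A x.toNat else 0 := by
    intro x
    rw [bBuildD_getD A A.length none PySem.Dict.empty le_rfl
      (by rw [List.drop_length]; rfl) x]
    rw [PySem.Dict.getD_empty]
  by_cases hcase : i ≤ (A.length : Int)
  · have := main_ind A _ hd ((A.length : Int) - i).toNat (A.length + 1) (A.length + 2) i 0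
      h0 hcase (hle hcase) rfl (by omega) (by omega)
    simpa using this
  · have hgti : (A.length : Int) < i := by omega
    obtain ⟨hne, hlast1⟩ := hgt hgti
    have hpos : 0 < A.length := List.length_pos_iff.mpr hne
    -- A's first step: the empty scan leaves minindex 0, so A returns 1 + recAfuel A len 1
    have hA1 : recAfuel A (A.length + 1) i = 1 + recAfuel A A.length 1 := by
      rw [recAfuel]
      rw [if_neg (by omega : ¬ i = (A.length : Int))]
      have hloop0 : recAloop A (((A.length : Int) - i).toNat + 1) i 1000000000 0
          = (1000000000, 0) := by
        rw [recAloop, if_neg (by omega : ¬ i < (A.length : Int))]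
      simp only [hloop0]
      rw [if_neg (by omega : ¬ i = (0 : Int))]
      norm_num
    -- B's first step: sufmin.get(i, 0) = 0, so it counts once and continues from 1
    have hB1 : bJump (bBuildD A A.length none PySem.Dict.empty) A.length (A.length + 2) i 0
        = bJump (bBuildD A A.length none PySem.Dict.empty) A.length (A.length + 1) 1 1 := by
      rw [bJump, if_pos (by omega : i ≠ (A.length : Int))]
      have hm0 : (bBuildD A A.length none PySem.Dict.empty).getD i 0 = 0 := by
        rw [hd i, if_neg (by omega : ¬ (0 ≤ i ∧ i < ((A.length : Nat) : Int)))]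
      simp only [hm0]
      rw [if_pos (by push_cast; omega : ((0 : Nat) : Int) ≠ i)]
      norm_num
    rw [hA1, hB1]
    have hlast : (1 : Int) = (A.length : Int) ∨ A.getD (A.length - 1) 0 < 1000000000 ∨
        (A.length = 1 ∧ (1 : Int) = 0) := by
      rcases hlast1 with h | h
      · left; omega
      · exact Or.inr (Or.inl h)
    exact main_ind A _ hd ((A.length : Int) - 1).toNat A.length (A.length + 1) 1 1
      (by omega) (by omega) hlast rfl (by omega) (by omega)
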